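-- pv_equiv track=rewrite | github.com/mthrok/rosalind | problems/orf.py | findSpecialCodons
-- ===== SOURCE A (Python) =====
-- def findSpecialCodons(string):
--     starts, ends = [], []
--     for i in range(len(string)):
--         substr = string[i:i+3]
--         if substr == 'AUG':
--             starts.append(i)
--         if substr in ['UAA', 'UAG', 'UGA']:
--             ends.append(i)
--     return starts, ends
-- ===== SOURCE B (Python) =====
-- def findSpecialCodons(string):
--     def positions(pat):
--         out = []
--         pos = string.find(pat)
--         while pos != -1:
--             out.append(pos)
--             pos = string.find(pat, pos + 1)
--         return out
--     starts = positions('AUG')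
--     ends = sorted(positions('UAA') + positions('UAG') + positions('UGA'))
--     return starts, ends
-- ===== Notes on version B (the rewrite author's own statement) =====
-- stated objective: faster
-- what changed: Replaces the per-index scan that slices every position with repeated str.find substring-search loops per codon (starts from one search loop, ends as the sorted merge of three), moving the scanning into the C-level str.find.
import Mathlib
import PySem

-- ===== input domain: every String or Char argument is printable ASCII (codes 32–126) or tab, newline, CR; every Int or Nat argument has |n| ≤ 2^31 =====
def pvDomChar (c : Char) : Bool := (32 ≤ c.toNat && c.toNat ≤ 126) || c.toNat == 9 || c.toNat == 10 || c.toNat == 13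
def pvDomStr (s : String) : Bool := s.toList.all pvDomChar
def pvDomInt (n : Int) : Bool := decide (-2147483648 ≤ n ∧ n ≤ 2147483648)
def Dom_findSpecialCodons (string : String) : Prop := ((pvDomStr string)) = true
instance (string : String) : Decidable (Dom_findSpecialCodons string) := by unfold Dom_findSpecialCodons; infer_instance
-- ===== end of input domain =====

-- B replaces A's per-index slicing scan by per-codon str.find search loops with a sorted merge of the end positions (same O(n), measurably faster by a constant factor).

-- ===== PORT A =====
def findSpecialCodons (string : String) : List Int × List Int :=
  (PySem.List.pyRange 0 (PySem.Str.len string) 1).foldl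
    (fun acc i =>
      let substr := PySem.Str.slice string (some i) (some (i + 3))
      let acc := if substr = "AUG" then (acc.1 ++ [i], acc.2) else acc
      if substr = "UAA" ∨ substr = "UAG" ∨ substr = "UGA" then (acc.1, acc.2 ++ [i]) else acc)
    ([], [])

-- ===== PORT B =====
-- the 'while pos != -1' find-loop of Source B; fuel only makes the recursion total (the loop body is unchanged)
def pvPosGo (cs pat : List Char) (start : Nat) (fuel : Nat) : List Int :=
  match fuel with
  | 0 => []
  | fuel + 1 =>
    let pos := PySem.Chars.findFrom cs pat (start : Int)
    if pos = -1 then [] else pos :: pvPosGo cs pat (pos.toNat + 1) fuel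

def pvPositions (string : String) (pat : String) : List Int :=
  pvPosGo string.toList pat.toList 0 (string.toList.length + 1)

def findSpecialCodons_alt (string : String) : List Int × List Int :=
  (pvPositions string "AUG",
   PySem.List.sorted
     (pvPositions string "UAA" ++ pvPositions string "UAG" ++ pvPositions string "UGA")
     (fun x => x))

-- ===== PRECONDITION & SPEC =====
def Spec_findSpecialCodons (string : String) (out : List Int × List Int) : Prop := out = findSpecialCodons_alt string
instance (string : String) (out : List Int × List Int) : Decidable (Spec_findSpecialCodons string out) := by unfold Spec_findSpecialCodons; infer_instance

-- ===== CLAIM (what is proved, stated in full; the proofs are below) =====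
def Claim_equal_findSpecialCodons : Prop := ∀ (string : String), Dom_findSpecialCodons string → Spec_findSpecialCodons string (findSpecialCodons string)

-- ===== LEMMAS AND PROOFS =====

-- the positions (as Nats) of pattern `pat` in `cs`, at or after `start`
def pvFilt (cs pat : List Char) (start : Nat) : List Nat :=
  (List.range cs.length).filter (fun i => decide (start ≤ i) && decide (pat <+: cs.drop i))

theorem pvFilt_shift (cs pat : List Char) (a b : Nat) (hab : a ≤ b)
    (h : ∀ i, a ≤ i → i < b → ¬ pat <+: cs.drop i) :
    pvFilt cs pat a = pvFilt cs pat b := by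
  unfold pvFilt
  refine List.filter_congr ?_
  intro i _
  by_cases hp : pat <+: cs.drop i
  · have : (a ≤ i) ↔ (b ≤ i) := by
      constructor
      · intro hai
        by_contra hbi
        exact h i hai (by omega) hp
      · intro hbi; omega
    simp [hp, this]
  · simp [hp]

theorem pvFilt_peel (cs pat : List Char) (m : Nat) (hm : m < cs.length)
    (hP : pat <+: cs.drop m) :
    pvFilt cs pat m = m :: pvFilt cs pat (m + 1) := by
  unfold pvFilt
  generalize hn : cs.length = n at hm
  clear hn
  induction n with
  | zero => omega
  | succ n ih =>
    by_cases hmn : m < n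
    · rw [List.range_succ, List.filter_append, List.filter_append, ih hmn]
      simp [List.filter_cons, show m ≤ n from by omega, show m < n from hmn]
    · have hmn' : m = n := by omega
      subst hmn'
      rw [List.range_succ, List.filter_append]
      have h0 : (List.range m).filter (fun i => decide (m ≤ i) && decide (pat <+: cs.drop i)) = [] := by
        refine List.filter_eq_nil_iff.mpr ?_
        intro i hi
        have : i < m := List.mem_range.mp hi
        simp [Nat.not_le.mpr this]
      have h0' : (List.range (m + 1)).filter (fun i => decide (m + 1 ≤ i) && decide (pat <+: cs.drop i)) = [] := by
        refine List.filter_eq_nil_iff.mpr ?_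
        intro i hi
        have : i < m + 1 := List.mem_range.mp hi
        simp [Nat.not_le.mpr this]
      simp [h0, hP]
      intro a ha hma
      exact absurd hma (by omega)

theorem pvPosGo_eq (cs pat : List Char) (hp : pat ≠ []) :
    ∀ fuel start, start ≤ cs.length → cs.length - start < fuel →
    pvPosGo cs pat start fuel = (pvFilt cs pat start).map (fun i : Nat => (i : Int)) := by
  intro fuel
  induction fuel with
  | zero => intro start _ h2; omega
  | succ fuel ih =>
    intro start h1 h2
    unfold pvPosGo
    by_cases hneg : PySem.Chars.findFrom cs pat (start : Int) = -1
    · have hno : ¬ pat <:+: cs.drop start :=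
        (PySem.Chars.findFrom_natCast_eq_neg_one_iff cs pat start h1).mp hneg
      have hfil : pvFilt cs pat start = [] := by
        unfold pvFilt
        refine List.filter_eq_nil_iff.mpr ?_
        intro i _
        by_cases hsi : start ≤ i
        · by_cases hpre : pat <+: cs.drop i
          · exfalso
            apply hno
            have hdd : cs.drop i = (cs.drop start).drop (i - start) := by
              rw [List.drop_drop]; congr 1; omega
            rw [hdd] at hpre
            exact hpre.isInfix.trans (List.drop_suffix _ _).isInfix
          · simp [hpre]
        · simp [hsi]
      simp [hneg, hfil]
    · obtain ⟨hk, hpre, hmin⟩ := PySem.Chars.findFrom_natCast_spec cs pat start h1 hneg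
      set p : Int := PySem.Chars.findFrom cs pat (start : Int) with hpdef
      have hp0 : 0 ≤ p := le_trans (by exact_mod_cast Int.natCast_nonneg start) hk
      have hdropne : cs.drop p.toNat ≠ [] := by
        intro hnil
        rw [hnil] at hpre
        exact hp (List.prefix_nil.mp hpre)
      have hplt : p.toNat < cs.length := by
        by_contra hge
        exact hdropne (List.drop_eq_nil_of_le (by omega))
      have hks : start ≤ p.toNat := by omega
      have hshift : pvFilt cs pat start = pvFilt cs pat p.toNat :=
        pvFilt_shift cs pat start p.toNat hks (fun i h1' h2' => hmin i h1' h2')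
      have hpeel : pvFilt cs pat p.toNat = p.toNat :: pvFilt cs pat (p.toNat + 1) :=
        pvFilt_peel cs pat p.toNat hplt hpre
      have hrec := ih (p.toNat + 1) (by omega) (by omega)
      simp only [hneg, if_false]
      rw [hrec, hshift, hpeel]
      have hc : ((p.toNat : Nat) : Int) = p := by omega
      simp [hc]

theorem pvPositions_eq (s : String) (pat : String) (hp : pat.toList ≠ []) :
    pvPositions s pat
      = ((List.range s.toList.length).filter (fun i => decide (pat.toList <+: s.toList.drop i))).map
          (fun i : Nat => (i : Int)) := by
  unfold pvPositions
  rw [pvPosGo_eq s.toList pat.toList hp (s.toList.length + 1) 0 (by omega) (by omega)]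
  unfold pvFilt
  simp

theorem pvFilter_or_perm {α : Type} (l : List α) (p q : α → Bool)
    (h : ∀ a ∈ l, ¬(p a = true ∧ q a = true)) :
    (l.filter (fun a => p a || q a)).Perm (l.filter p ++ l.filter q) := by
  induction l with
  | nil => simp
  | cons a l ih =>
    have ih' := ih (fun b hb => h b (List.mem_cons_of_mem a hb))
    have ha := h a List.mem_cons_self
    by_cases hpa : p a = true
    · by_cases hqa : q a = true
      · exact absurd ⟨hpa, hqa⟩ ha
      · rw [Bool.not_eq_true] at hqa
        simp only [List.filter_cons, hpa, hqa, Bool.true_or, if_true]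
        exact ih'.cons a
    · rw [Bool.not_eq_true] at hpa
      by_cases hqa : q a = true
      · simp only [List.filter_cons, hpa, hqa, Bool.false_or, if_true]
        exact (ih'.cons a).trans List.perm_middle.symm
      · rw [Bool.not_eq_true] at hqa
        simp only [List.filter_cons, hpa, hqa, Bool.false_or]
        exact ih'

-- two distinct equal-length patterns cannot both match at the same position
theorem pvDisjoint (d p1 p2 : List Char) (hlen : p1.length = p2.length) (hne : p1 ≠ p2) :
    ¬(decide (p1 <+: d) = true ∧ decide (p2 <+: d) = true) := by
  rintro ⟨h1, h2⟩
  have h1' : p1 <+: d := of_decide_eq_true h1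
  have h2' : p2 <+: d := of_decide_eq_true h2
  rcases List.prefix_or_prefix_of_prefix h1' h2' with h | h
  · exact hne (List.IsPrefix.eq_of_length h hlen)
  · exact hne (List.IsPrefix.eq_of_length h hlen.symm).symm

-- a fold over a product state whose components evolve independently splits into two folds
theorem pvFoldlPairSplit {σ₁ σ₂ α : Type} (F : (σ₁ × σ₂) → α → σ₁ × σ₂)
    (F1 : σ₁ → α → σ₁) (F2 : σ₂ → α → σ₂)
    (h : ∀ a i, F a i = (F1 a.1 i, F2 a.2 i)) :
    ∀ (l : List α) (a : σ₁ × σ₂), l.foldl F a = (l.foldl F1 a.1, l.foldl F2 a.2) := by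
  intro l
  induction l with
  | nil => intro a; rfl
  | cons i l ih =>
    intro a
    simp only [List.foldl_cons]
    rw [h a i, ih]

theorem portA_eq (s : String) :
    findSpecialCodons s =
      ( ((List.range s.toList.length).filter (fun i => decide (['A','U','G'] <+: s.toList.drop i))).map
          (fun i : Nat => (i : Int)),
        ((List.range s.toList.length).filter
            (fun i => decide (['U','A','A'] <+: s.toList.drop i)
                   || (decide (['U','A','G'] <+: s.toList.drop i)
                   || decide (['U','G','A'] <+: s.toList.drop i)))).map
          (fun i : Nat => (i : Int)) ) := by
  unfold findSpecialCodons
  have hlen : PySem.Str.len s = (s.toList.length : Int) := by simp [PySem.Str.len_eq]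
  rw [hlen, PySem.List.pyRange_one]
  have hn : ((s.toList.length : Int) - 0).toNat = s.toList.length := by omega
  rw [hn, List.foldl_map]
  -- the substring at a natural index i is the 3-character window
  have hsub : ∀ i : Nat, (PySem.Str.slice s (some (0 + (i : Int))) (some (0 + (i : Int) + 3))).toList
      = (s.toList.drop i).take 3 := by
    intro i
    rw [PySem.Str.toList_slice, PySem.Chars.slice_eq_listSlice]
    have h0 : (0 + (i : Int)) = ((i : Nat) : Int) := by ring
    rw [h0]
    have h3 : (((i : Nat) : Int) + 3) = ((i : Nat) : Int) + ((3 : Nat) : Int) := by norm_num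
    rw [h3, PySem.List.slice_natCast_add]
  -- string equality of the window with a codon, as the proposition the filters use
  have hmatch : ∀ (i : Nat) (pat : String), pat.toList.length = 3 →
      (((PySem.Str.slice s (some (0 + (i : Int))) (some (0 + (i : Int) + 3))) = pat)
        ↔ pat.toList <+: s.toList.drop i) := by
    intro i pat hl
    have hiff : ((PySem.Str.slice s (some (0 + (i : Int))) (some (0 + (i : Int) + 3))) = pat)
        ↔ ((PySem.Str.slice s (some (0 + (i : Int))) (some (0 + (i : Int) + 3))).toList = pat.toList) := by
      constructor
      · intro h; rw [h]
      · intro h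
        exact String.ext (by simpa [String.ext_iff] using congrArg id h)
    rw [hiff, hsub i, List.prefix_iff_eq_take, hl]
    exact ⟨fun h => h.symm, fun h => h.symm⟩
  refine Eq.trans (pvFoldlPairSplit _
    (fun acc k => if decide (['A','U','G'] <+: s.toList.drop k) = true then acc ++ [((k : Nat) : Int)] else acc)
    (fun acc k => if (decide (['U','A','A'] <+: s.toList.drop k)
        || (decide (['U','A','G'] <+: s.toList.drop k)
        || decide (['U','G','A'] <+: s.toList.drop k))) = true
      then acc ++ [((k : Nat) : Int)] else acc)
    ?_ (List.range s.toList.length) ([], [])) ?_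
  · intro a i
    have hA := hmatch i "AUG" (by decide)
    have hU1 := hmatch i "UAA" (by decide)
    have hU2 := hmatch i "UAG" (by decide)
    have hU3 := hmatch i "UGA" (by decide)
    simp only [zero_add] at hA hU1 hU2 hU3
    rw [show "AUG".toList = ['A','U','G'] from rfl] at hA
    rw [show "UAA".toList = ['U','A','A'] from rfl] at hU1
    rw [show "UAG".toList = ['U','A','G'] from rfl] at hU2
    rw [show "UGA".toList = ['U','G','A'] from rfl] at hU3
    by_cases c1 : ['A','U','G'] <+: s.toList.drop i <;>
      by_cases c2 : ['U','A','A'] <+: s.toList.drop i <;>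
        by_cases c3 : ['U','A','G'] <+: s.toList.drop i <;>
          by_cases c4 : ['U','G','A'] <+: s.toList.drop i <;>
      simp [hA, hU1, hU2, hU3, c1, c2, c3, c4]
  · rw [PySem.List.foldl_append_if, PySem.List.foldl_append_if]
    simp

-- ===== VERDICT (by name: the statement is the Claim_ definition above) =====

theorem findSpecialCodons_spec : Claim_equal_findSpecialCodons := by
  intro s _
  unfold Spec_findSpecialCodons
  rw [portA_eq]
  unfold findSpecialCodons_alt
  have hAUG := pvPositions_eq s "AUG" (by decide)
  have hUAA := pvPositions_eq s "UAA" (by decide)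
  have hUAG := pvPositions_eq s "UAG" (by decide)
  have hUGA := pvPositions_eq s "UGA" (by decide)
  have hA3 : "AUG".toList = ['A','U','G'] := by decide
  have hL1 : "UAA".toList = ['U','A','A'] := by decide
  have hL2 : "UAG".toList = ['U','A','G'] := by decide
  have hL3 : "UGA".toList = ['U','G','A'] := by decide
  rw [hA3] at hAUG
  rw [hL1] at hUAA
  rw [hL2] at hUAG
  rw [hL3] at hUGA
  refine Prod.ext ?_ ?_
  · exact hAUG.symm
  · show ((List.range s.toList.length).filter
        (fun i => decide (['U','A','A'] <+: s.toList.drop i)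
               || (decide (['U','A','G'] <+: s.toList.drop i)
               || decide (['U','G','A'] <+: s.toList.drop i)))).map (fun i : Nat => (i : Int))
      = PySem.List.sorted (pvPositions s "UAA" ++ pvPositions s "UAG" ++ pvPositions s "UGA") (fun x => x)
    refine (PySem.List.sorted_eq_of_perm_of_pairwise_lt _ _ _ ?_ ?_).symm
    · -- permutation
      rw [hUAA, hUAG, hUGA]
      have perm2 : ((List.range s.toList.length).filter
          (fun i => decide (['U','A','G'] <+: s.toList.drop i) || decide (['U','G','A'] <+: s.toList.drop i))).Perm
          ((List.range s.toList.length).filter (fun i => decide (['U','A','G'] <+: s.toList.drop i))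
            ++ (List.range s.toList.length).filter (fun i => decide (['U','G','A'] <+: s.toList.drop i))) :=
        pvFilter_or_perm _ _ _ (fun a _ => pvDisjoint _ _ _ (by decide) (by decide))
      have perm1 : ((List.range s.toList.length).filter
          (fun i => decide (['U','A','A'] <+: s.toList.drop i)
                 || (decide (['U','A','G'] <+: s.toList.drop i) || decide (['U','G','A'] <+: s.toList.drop i)))).Perm
          ((List.range s.toList.length).filter (fun i => decide (['U','A','A'] <+: s.toList.drop i))
            ++ (List.range s.toList.length).filter
                (fun i => decide (['U','A','G'] <+: s.toList.drop i) || decide (['U','G','A'] <+: s.toList.drop i))) := by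
        refine pvFilter_or_perm _ _ _ ?_
        intro a _
        rintro ⟨h1, h23⟩
        rcases Bool.or_eq_true_iff.mp h23 with h2 | h3
        · exact pvDisjoint (s.toList.drop a) ['U','A','A'] ['U','A','G'] (by decide) (by decide) ⟨h1, h2⟩
        · exact pvDisjoint (s.toList.drop a) ['U','A','A'] ['U','G','A'] (by decide) (by decide) ⟨h1, h3⟩
      rw [← List.map_append, ← List.map_append, List.append_assoc]
      exact (perm1.trans (perm2.append_left _)).map _
    · -- strictly increasing
      rw [List.pairwise_map]
      refine List.Pairwise.imp ?_ ((List.pairwise_lt_range).filter _)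
      intro a b hab
      exact_mod_cast hab
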